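-- pv_equiv track=rewrite | github.com/jphaupt/CIPSIpy | src/cipsipy/determinants.py | get_creation_pair
-- ===== SOURCE A (Python) =====
-- from typing import Tuple, Optional
--
-- def get_creation_pair(G_pq: int, S: int, norb: int) -> Optional[Tuple[int, int]]:
--     """
--     Check if there exists a pair (r,s) such that G_pq^rs = S
--
--     G_pq and S are determinants in spinorbitals, i.e. length 2*norb
--
--     Returns
--         Tuple (r, s) if such a pair exists, None otherwise
--     """
--     diff = S ^ G_pq
--     positions = []
--     for i in range(2 * norb):
--         if (diff >> i) & 1:
--             positions.append(i)
--     if len(positions) == 2: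
--         # check set in Sdet but not in G_pq
--         r, s = positions[0], positions[1]
--         if ((S >> r) & 1) and ((S >> s) & 1):
--             if not ((G_pq >> r) & 1) and not ((G_pq >> s) & 1):
--                 return (r, s)
--     return None
-- ===== SOURCE B (Python) =====
-- from typing import Tuple, Optional
--
-- def get_creation_pair(G_pq: int, S: int, norb: int) -> Optional[Tuple[int, int]]:
--     """
--     Check if there exists a pair (r,s) such that G_pq^rs = S.
--     Word-level bit tricks instead of a per-position loop; the 2*norb-bit
--     window mask is only materialized when it is no wider than the operands.
--     """
--     if norb <= 0:
--         return None
--     w = 2 * norb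
--     d = S ^ G_pq
--     if d < 0:
--         # sign extension: every window bit from d.bit_length() on differs
--         if w > d.bit_length() + 2:
--             return None                  # at least 3 differing bits in the window
--         d &= (1 << w) - 1
--     elif d.bit_length() > w:
--         d &= (1 << w) - 1
--     if d == 0:
--         return None
--     d2 = d & (d - 1)                     # d with its lowest set bit cleared
--     if d2 == 0 or d2 & (d2 - 1) != 0:
--         return None                      # fewer or more than two differing bits
--     r = (d ^ d2).bit_length() - 1        # lowest differing position
--     s = d2.bit_length() - 1              # highest differing position
--     if (S >> r) & 1 and (S >> s) & 1:    # both set in S => both clear in G_pq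
--         return (r, s)
--     return None
-- ===== Notes on version B (the rewrite author's own statement) =====
-- stated objective: faster
-- what changed: Replaces the O(norb) per-position loop that collects differing bit indices with constant-work integer bit tricks: an early exit via bit_length for negative xors, a window mask materialized only when it is no wider than the operands, the classic d&(d-1) test for 'exactly two bits set', and lowest/highest set-bit extraction via bit_length; the redundant G_pq re-check is dropped since at a differing position a bit set in S is necessarily clear in G_pq.
import Mathlib
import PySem

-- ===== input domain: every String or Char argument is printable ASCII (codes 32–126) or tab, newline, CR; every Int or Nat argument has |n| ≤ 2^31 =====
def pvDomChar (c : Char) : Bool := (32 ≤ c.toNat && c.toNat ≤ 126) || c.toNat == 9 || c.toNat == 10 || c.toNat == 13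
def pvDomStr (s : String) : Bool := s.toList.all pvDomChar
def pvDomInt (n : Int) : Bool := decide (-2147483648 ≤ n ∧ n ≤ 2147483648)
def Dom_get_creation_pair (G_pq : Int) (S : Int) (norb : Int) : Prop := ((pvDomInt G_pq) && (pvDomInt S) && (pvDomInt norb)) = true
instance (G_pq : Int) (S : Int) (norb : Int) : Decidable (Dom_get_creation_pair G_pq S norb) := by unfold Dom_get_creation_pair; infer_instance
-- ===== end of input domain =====

-- B replaces A's O(norb) per-position scan by word-level bit tricks (mask, popcount, lowest/highest set bit);
-- same return value everywhere.

-- ===== PORT A =====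
-- literal transliteration of A; every shift amount (loop indices from range(2*norb), the found
-- positions r, s) is ≥ 0, where Mathlib's Int-by-Int shift agrees with Python's
def get_creation_pair (G_pq : Int) (S : Int) (norb : Int) : Option (Int × Int) :=
  let diff := PySem.Int.bxor S G_pq
  let positions := (PySem.List.pyRange 0 (2 * norb)).foldl
    (fun acc i => if PySem.Int.band (diff >>> i) 1 ≠ 0 then acc ++ [i] else acc) []
  if positions.length = 2 then
    let r := PySem.List.pyGetD positions 0 0
    let s := PySem.List.pyGetD positions 1 0
    if PySem.Int.band (S >>> r) 1 ≠ 0 ∧ PySem.Int.band (S >>> s) 1 ≠ 0 then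
      if PySem.Int.band (G_pq >>> r) 1 = 0 ∧ PySem.Int.band (G_pq >>> s) 1 = 0 then
        some (r, s)
      else none
    else none
  else none

-- ===== PORT B =====
-- literal transliteration of Source B; int.bit_length is PySem.Int.bitLength (exact, reads |n| like Python);
-- every shift amount reached is ≥ 0, where Mathlib's Int-by-Int shift agrees with Python's
def get_creation_pair_alt (G_pq : Int) (S : Int) (norb : Int) : Option (Int × Int) :=
  if norb ≤ 0 then none
  else
    let w := 2 * norb
    let d0 := PySem.Int.bxor S G_pq
    if d0 < 0 ∧ w > (PySem.Int.bitLength d0 : Int) + 2 then none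
    else
      let d := if d0 < 0 then PySem.Int.band d0 ((1 <<< w) - 1)
               else if (PySem.Int.bitLength d0 : Int) > w then PySem.Int.band d0 ((1 <<< w) - 1)
               else d0
      if d = 0 then none
      else
        let d2 := PySem.Int.band d (d - 1)
        if d2 = 0 ∨ PySem.Int.band d2 (d2 - 1) ≠ 0 then none
        else
          let r := (PySem.Int.bitLength (PySem.Int.bxor d d2) : Int) - 1
          let s := (PySem.Int.bitLength d2 : Int) - 1
          if PySem.Int.band (S >>> r) 1 ≠ 0 ∧ PySem.Int.band (S >>> s) 1 ≠ 0 then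
            some (r, s)
          else none

-- ===== PRECONDITION & SPEC =====
def Spec_get_creation_pair (G_pq : Int) (S : Int) (norb : Int) (out : Option (Int × Int)) : Prop := out = get_creation_pair_alt G_pq S norb
instance (G_pq : Int) (S : Int) (norb : Int) (out : Option (Int × Int)) : Decidable (Spec_get_creation_pair G_pq S norb out) := by unfold Spec_get_creation_pair; infer_instance

-- ===== CLAIM (what is proved, stated in full; the proofs are below) =====
def Claim_equal_get_creation_pair : Prop := ∀ (G_pq : Int) (S : Int) (norb : Int), Dom_get_creation_pair G_pq S norb → Spec_get_creation_pair G_pq S norb (get_creation_pair G_pq S norb)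

-- ===== LEMMAS AND PROOFS =====



lemma pv_pyRange_nil {b : Int} (h : b ≤ 0) : PySem.List.pyRange 0 b = [] := by
  simp [PySem.List.pyRange, show ¬ (0 < b) by omega]

lemma pv_foldl_app_if {α : Type} (p : α → Prop) [DecidablePred p] (l : List α) (acc : List α) :
    l.foldl (fun acc x => if p x then acc ++ [x] else acc) acc
      = acc ++ l.filter (fun x => decide (p x)) := by
  induction l generalizing acc with
  | nil => simp
  | cons x t ih =>
    by_cases hx : p x <;> simp [hx, ih]

lemma pv_tbN_div (m k : Nat) : m.testBit k = decide (m / 2 ^ k % 2 = 1) := by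
  induction k generalizing m with
  | zero => simp [Nat.testBit_zero]
  | succ k ih =>
    rw [Nat.testBit_succ, ih, Nat.div_div_eq_div_mul]
    ring_nf

lemma pv_itb (x : Int) (k : Nat) : ((x >>> k) % 2 = 1) ↔ x.testBit k = true := by
  cases x with
  | ofNat m =>
    show ((Int.ofNat (m >>> k)) % 2 = 1) ↔ m.testBit k = true
    rw [pv_tbN_div, Nat.shiftRight_eq_div_pow]
    simp only [decide_eq_true_eq, Int.ofNat_eq_natCast]
    omega
  | negSucc m =>
    show ((Int.negSucc (m >>> k)) % 2 = 1) ↔ (!m.testBit k) = true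
    rw [Int.negSucc_eq, pv_tbN_div, Nat.shiftRight_eq_div_pow]
    simp only [Bool.not_eq_true', decide_eq_false_iff_not]
    omega

lemma pv_cond_iff (x : Int) (k : Nat) :
    (PySem.Int.band (x >>> k) 1 ≠ 0) ↔ x.testBit k = true := by
  rw [PySem.Int.band_one, PySem.Int.mod_eq_emod_of_pos (by norm_num), ← pv_itb]
  omega

lemma pv_tb_negSucc (m : Nat) (k : Nat) : Int.testBit (Int.negSucc m) k = !m.testBit k := rfl

lemma pv_tb_nonneg (a : Int) (h : 0 ≤ a) (k : Nat) : a.testBit k = a.toNat.testBit k := by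
  cases a with
  | ofNat m => rfl
  | negSucc m => omega

lemma pv_tb_neg (b : Int) (h : b < 0) (k : Nat) : b.testBit k = !(((-b - 1).toNat).testBit k) := by
  cases b with
  | ofNat m => rw [Int.ofNat_eq_natCast] at h; omega
  | negSucc m =>
    rw [pv_tb_negSucc]
    congr 2
    rw [Int.negSucc_eq]
    omega

lemma pv_itb_natCast (m : Nat) (k : Nat) : Int.testBit (↑m : Int) k = m.testBit k := rfl

-- the ports shift by a nonnegative Int; bridge to the Nat-shift form of the lemmas above
lemma pv_cond_iff' (x : Int) (k : Nat) :
    (PySem.Int.band (x >>> ((k : Nat) : Int)) 1 ≠ 0) ↔ x.testBit k = true := by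
  rw [Int.shiftRight_natCast_right]
  exact pv_cond_iff x k

lemma pv_one_shiftl (n : Nat) : (1 : Int) <<< ((n : Nat) : Int) = 2 ^ n := by
  rw [Int.shiftLeft_natCast_right, Int.shiftLeft_eq, one_mul]

lemma pv_itb_bxor (a b : Int) (k : Nat) :
    (PySem.Int.bxor a b).testBit k = (a.testBit k != b.testBit k) := by
  rcases (show 0 ≤ a ∨ a < 0 by omega) with ha | ha <;>
    rcases (show 0 ≤ b ∨ b < 0 by omega) with hb | hb
  · rw [show PySem.Int.bxor a b = ↑(a.toNat ^^^ b.toNat) by simp [PySem.Int.bxor, ha, hb]]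
    rw [show Int.testBit ↑(a.toNat ^^^ b.toNat) k = (a.toNat ^^^ b.toNat).testBit k from rfl,
      Nat.testBit_xor, pv_tb_nonneg a ha, pv_tb_nonneg b hb]
  · rw [show PySem.Int.bxor a b = Int.negSucc (a.toNat ^^^ (-b - 1).toNat) by
      rw [Int.negSucc_eq]; simp [PySem.Int.bxor, ha, show ¬ (0 ≤ b) by omega]; ring]
    rw [pv_tb_negSucc, Nat.testBit_xor, pv_tb_nonneg a ha, pv_tb_neg b hb]
    cases a.toNat.testBit k <;> cases ((-b - 1).toNat).testBit k <;> rfl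
  · rw [show PySem.Int.bxor a b = Int.negSucc ((-a - 1).toNat ^^^ b.toNat) by
      rw [Int.negSucc_eq]; simp [PySem.Int.bxor, hb, show ¬ (0 ≤ a) by omega]; ring]
    rw [pv_tb_negSucc, Nat.testBit_xor, pv_tb_neg a ha, pv_tb_nonneg b hb]
    cases ((-a - 1).toNat).testBit k <;> cases b.toNat.testBit k <;> rfl
  · rw [show PySem.Int.bxor a b = ↑((-a - 1).toNat ^^^ (-b - 1).toNat) by
      simp [PySem.Int.bxor, show ¬ (0 ≤ a) by omega, show ¬ (0 ≤ b) by omega]]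
    rw [show Int.testBit ↑((-a - 1).toNat ^^^ (-b - 1).toNat) k
        = ((-a - 1).toNat ^^^ (-b - 1).toNat).testBit k from rfl,
      Nat.testBit_xor, pv_tb_neg a ha, pv_tb_neg b hb]
    cases ((-a - 1).toNat).testBit k <;> cases ((-b - 1).toNat).testBit k <;> rfl

lemma pv_band_mask (x : Int) (n : Nat) :
    PySem.Int.band x ((2 : Int) ^ n - 1) = x % (2 : Int) ^ n := by
  have h1 : (1 : Nat) ≤ 2 ^ n := Nat.one_le_two_pow
  have hPc : ((2 : Int) ^ n) = ((2 ^ n : Nat) : Int) := by push_cast; ring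
  have hm0 : (0 : Int) ≤ (2 : Int) ^ n - 1 := by rw [hPc]; omega
  have hmn : ((2 : Int) ^ n - 1).toNat = 2 ^ n - 1 := by omega
  rcases (show 0 ≤ x ∨ x < 0 by omega) with hx | hx
  · rw [PySem.Int.band_of_nonneg hx hm0, hmn, Nat.and_two_pow_sub_one_eq_mod,
      show x = ((x.toNat : Int)) by omega, hPc]
    push_cast
    simp
  · have hbr : PySem.Int.band x ((2 : Int) ^ n - 1)
        = ↑(((2 : Int) ^ n - 1).toNat - (((2 : Int) ^ n - 1).toNat &&& (-x - 1).toNat)) := by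
      unfold PySem.Int.band
      rw [if_neg (show ¬ (0 ≤ x) by omega), if_pos hm0]
    rw [hbr, hmn, Nat.and_comm, Nat.and_two_pow_sub_one_eq_mod]
    set y : Nat := (-x - 1).toNat with hy
    have hxy : x = -(y : Int) - 1 := by omega
    have hylt : y % 2 ^ n < 2 ^ n := Nat.mod_lt _ (by omega)
    have hdmZ : ((2 ^ n : Nat) : Int) * ((y / 2 ^ n : Nat) : Int) + ((y % 2 ^ n : Nat) : Int) = (y : Int) := by
      exact_mod_cast congrArg (Nat.cast : Nat → Int) (Nat.div_add_mod y (2 ^ n))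
    have hrepr : x = ((2 : Int) ^ n - 1 - ((y % 2 ^ n : Nat) : Int))
        + (2 : Int) ^ n * (-(((y / 2 ^ n : Nat) : Int)) - 1) := by
      rw [hxy, hPc]
      linear_combination hdmZ
    rw [hrepr, Int.add_mul_emod_self_left,
      Int.emod_eq_of_lt (by rw [hPc]; omega) (by rw [hPc]; omega)]
    rw [hPc]
    omega

lemma pv_itb_emod_pow (x : Int) (n k : Nat) (h : k < n) :
    (x % (2 : Int) ^ n).testBit k = x.testBit k := by
  obtain ⟨j, rfl⟩ : ∃ j, n = k + 1 + j := ⟨n - (k + 1), by omega⟩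
  rw [Bool.eq_iff_iff, ← pv_itb, ← pv_itb, Int.shiftRight_eq_div_pow, Int.shiftRight_eq_div_pow]
  have hk : ((2 : Int) ^ k) ≠ 0 := by positivity
  have h1 : x = x % (2 : Int) ^ (k + 1 + j)
      + (2 : Int) ^ k * (2 * ((2 : Int) ^ j * (x / (2 : Int) ^ (k + 1 + j)))) := by
    rw [Int.emod_def]; ring
  have h2 : x / ((2 ^ k : Nat) : Int) = x % (2 : Int) ^ (k + 1 + j) / ((2 ^ k : Nat) : Int)
      + 2 * ((2 : Int) ^ j * (x / (2 : Int) ^ (k + 1 + j))) := by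
    conv_lhs => rw [h1]
    rw [show ((2 : Int) ^ k) = ((2 ^ k : Nat) : Int) by push_cast; ring] at hk ⊢
    exact Int.add_mul_ediv_left _ _ hk
  rw [h2, Int.add_mul_emod_self_left]

lemma pv_bitCount_len : ∀ (n : Nat) (m : Nat), m < 2 ^ n →
    PySem.Int.bitCount (↑m : Int) = ((List.range n).filter (fun k => m.testBit k)).length := by
  intro n
  induction n with
  | zero =>
    intro m hm
    interval_cases m
    simp [PySem.Int.bitCount_zero]
  | succ n ih =>
    intro m hm
    rcases Nat.eq_zero_or_pos m with rfl | hm0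
    · simp [PySem.Int.bitCount_zero, Nat.zero_testBit]
    · rw [PySem.Int.bitCount_natCast hm0, ih (m / 2) (by omega),
        List.range_succ_eq_map, List.filter_cons]
      have hsucc : ∀ k, m.testBit (k + 1) = (m / 2).testBit k := fun k => Nat.testBit_succ m k
      rw [List.filter_map]
      have : ((fun k => m.testBit k) ∘ Nat.succ) = fun k => (m / 2).testBit k := by
        funext k; exact hsucc k
      rw [this]
      rw [Nat.testBit_zero]
      by_cases hpar : m % 2 = 1 <;> simp [hpar] <;> omega

lemma pv_bitLength_eq (m s : Nat) (h1 : 2 ^ s ≤ m) (h2 : m < 2 ^ (s + 1)) :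
    PySem.Int.bitLength (↑m : Int) = s + 1 := by
  have hne : ((m : Int)) ≠ 0 := by
    have := Nat.two_pow_pos s
    omega
  have hub := PySem.Int.lt_two_pow_bitLength (↑m : Int)
  have hlb := PySem.Int.two_pow_bitLength_le (↑m : Int) hne
  rw [Int.natAbs_natCast] at hub hlb
  set L := PySem.Int.bitLength (↑m : Int) with hL
  have hsl : s < L := by
    by_contra hc
    exact absurd (lt_of_le_of_lt h1 hub) (by
      have : (2 : Nat) ^ L ≤ 2 ^ s := Nat.pow_le_pow_right (by norm_num) (by omega)
      omega)
  have hls : L - 1 < s + 1 := by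
    by_contra hc
    exact absurd (lt_of_le_of_lt hlb h2) (by
      have : (2 : Nat) ^ (s + 1) ≤ 2 ^ (L - 1) := Nat.pow_le_pow_right (by norm_num) (by omega)
      omega)
  omega

lemma pv_tb_sum (r s j : Nat) (h : r < s) :
    (2 ^ s + 2 ^ r).testBit j = (decide (j = r) || decide (j = s)) := by
  have hb : (2 : Nat) ^ r < 2 ^ s := Nat.pow_lt_pow_right (by norm_num) h
  have := Nat.testBit_two_pow_mul_add 1 (b := 2 ^ r) (i := s) hb j
  rw [Nat.mul_one] at this
  rw [this]
  by_cases hj : j < s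
  · rw [if_pos hj, Nat.testBit_two_pow]
    have : ¬ (j = s) := by omega
    simp only [this, decide_false, Bool.or_false]
    simp [eq_comm]
  · rw [if_neg hj, show (1 : Nat) = 2 ^ 0 by norm_num, Nat.testBit_two_pow]
    have h1 : ¬ (j = r) := by omega
    simp only [h1, decide_false, Bool.false_or]
    simp only [decide_eq_decide]
    omega

lemma pv_tb_sum_sub_one (r s j : Nat) (h : r < s) :
    (2 ^ s + 2 ^ r - 1).testBit j = (decide (j < r) || decide (j = s)) := by
  have h1 : (1 : Nat) ≤ 2 ^ r := Nat.one_le_two_pow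
  have hb : (2 : Nat) ^ r - 1 < 2 ^ s := by
    have : (2 : Nat) ^ r < 2 ^ s := Nat.pow_lt_pow_right (by norm_num) h
    omega
  have heq : 2 ^ s + 2 ^ r - 1 = 2 ^ s * 1 + (2 ^ r - 1) := by omega
  rw [heq, Nat.testBit_two_pow_mul_add 1 hb j]
  by_cases hj : j < s
  · rw [if_pos hj, Nat.testBit_two_pow_sub_one]
    have : ¬ (j = s) := by omega
    simp [this]
  · rw [if_neg hj, show (1 : Nat) = 2 ^ 0 by norm_num, Nat.testBit_two_pow]
    have h2 : ¬ (j < r) := by omega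
    simp only [h2, decide_false, Bool.false_or, decide_eq_decide]
    omega

lemma pv_and_sub_one (r s : Nat) (h : r < s) :
    (2 ^ s + 2 ^ r) &&& (2 ^ s + 2 ^ r - 1) = 2 ^ s := by
  apply Nat.eq_of_testBit_eq
  intro j
  rw [Nat.testBit_and, pv_tb_sum r s j h, pv_tb_sum_sub_one r s j h, Nat.testBit_two_pow]
  by_cases h1 : j = r <;> by_cases h2 : j = s <;> by_cases h3 : j < r <;>
    simp [h1, h2, h3] <;> omega

lemma pv_xor_high (r s : Nat) (h : r < s) :
    (2 ^ s + 2 ^ r) ^^^ 2 ^ s = 2 ^ r := by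
  apply Nat.eq_of_testBit_eq
  intro j
  rw [Nat.testBit_xor, pv_tb_sum r s j h, Nat.testBit_two_pow, Nat.testBit_two_pow]
  by_cases h1 : j = r <;> by_cases h2 : j = s <;> simp [h1, h2] <;> omega

lemma pv_filter_two (n m r s : Nat) (hm : m < 2 ^ n)
    (h : (List.range n).filter (fun k => m.testBit k) = [r, s]) :
    r < s ∧ m = 2 ^ s + 2 ^ r := by
  have hpw : List.Pairwise (· < ·) ((List.range n).filter (fun k => m.testBit k)) :=
    List.Pairwise.filter _ List.pairwise_lt_range
  rw [h] at hpw
  have hrs : r < s := by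
    rcases List.pairwise_cons.1 hpw with ⟨h1, _⟩
    exact h1 s (by simp)
  refine ⟨hrs, ?_⟩
  have hmem : ∀ k, m.testBit k = true ↔ (k = r ∨ k = s) := by
    intro k
    constructor
    · intro hk
      have hkn : k < n := by
        by_contra hc
        have : m < 2 ^ k := lt_of_lt_of_le hm (Nat.pow_le_pow_right (by norm_num) (by omega))
        rw [Nat.testBit_lt_two_pow this] at hk
        exact Bool.false_ne_true hk
      have : k ∈ (List.range n).filter (fun k => m.testBit k) := by
        rw [List.mem_filter, List.mem_range]; exact ⟨hkn, hk⟩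
      rw [h] at this
      simpa using this
    · intro hk
      have : k ∈ [r, s] := by simpa using hk
      rw [← h] at this
      exact (List.mem_filter.1 this).2
  apply Nat.eq_of_testBit_eq
  intro j
  rw [pv_tb_sum r s j hrs]
  rcases Bool.eq_false_or_eq_true (m.testBit j) with hb | hb <;> rw [hb]
  · have := (hmem j).1 hb
    rcases this with rfl | rfl <;> simp
  · have hn : ¬ (j = r ∨ j = s) := fun hc => by simp [(hmem j).2 hc] at hb
    rw [not_or] at hn
    simp [hn.1, hn.2]


-- A's if-chain, once its loop has been rewritten into a filter over Nat positions
def pvAhead (G_pq S : Int) (L : List Nat) : Option (Int × Int) :=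
  if (L.map (fun k : Nat => (k : Int))).length = 2 then
    if PySem.Int.band (S >>> PySem.List.pyGetD (L.map (fun k : Nat => (k : Int))) 0 0) 1 ≠ 0 ∧
        PySem.Int.band (S >>> PySem.List.pyGetD (L.map (fun k : Nat => (k : Int))) 1 0) 1 ≠ 0 then
      if PySem.Int.band (G_pq >>> PySem.List.pyGetD (L.map (fun k : Nat => (k : Int))) 0 0) 1 = 0 ∧
          PySem.Int.band (G_pq >>> PySem.List.pyGetD (L.map (fun k : Nat => (k : Int))) 1 0) 1 = 0 then
        some (PySem.List.pyGetD (L.map (fun k : Nat => (k : Int))) 0 0,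
          PySem.List.pyGetD (L.map (fun k : Nat => (k : Int))) 1 0)
      else none
    else none
  else none

-- B's tail, once the masked value has been identified as the Nat m
def pvTail (S : Int) (m : Nat) : Option (Int × Int) :=
  if ((m : Nat) : Int) = 0 then none
  else
    if PySem.Int.band ((m : Nat) : Int) (((m : Nat) : Int) - 1) = 0 ∨
        PySem.Int.band (PySem.Int.band ((m : Nat) : Int) (((m : Nat) : Int) - 1))
          (PySem.Int.band ((m : Nat) : Int) (((m : Nat) : Int) - 1) - 1) ≠ 0 then none
    else
      if PySem.Int.band (S >>> ((PySem.Int.bitLength (PySem.Int.bxor ((m : Nat) : Int)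
            (PySem.Int.band ((m : Nat) : Int) (((m : Nat) : Int) - 1))) : Int) - 1)) 1 ≠ 0 ∧
          PySem.Int.band (S >>> ((PySem.Int.bitLength
            (PySem.Int.band ((m : Nat) : Int) (((m : Nat) : Int) - 1)) : Int) - 1)) 1 ≠ 0 then
        some ((PySem.Int.bitLength (PySem.Int.bxor ((m : Nat) : Int)
            (PySem.Int.band ((m : Nat) : Int) (((m : Nat) : Int) - 1))) : Int) - 1,
          (PySem.Int.bitLength (PySem.Int.band ((m : Nat) : Int) (((m : Nat) : Int) - 1)) : Int) - 1)
      else none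

lemma pv_decomp_tb (r a j : Nat) :
    (2 ^ r * (2 * a + 1)).testBit j = if j < r then false else (2 * a + 1).testBit (j - r) := by
  conv_lhs => rw [show 2 ^ r * (2 * a + 1) = 2 ^ r * (2 * a + 1) + 0 by omega]
  rw [Nat.testBit_two_pow_mul_add _ (show (0:Nat) < 2 ^ r by positivity) j]
  by_cases hj : j < r <;> simp [hj, Nat.zero_testBit]

lemma pv_decomp_tb_self (r a : Nat) : (2 ^ r * (2 * a + 1)).testBit r = true := by
  rw [pv_decomp_tb, if_neg (by omega), Nat.sub_self, Nat.testBit_zero]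
  simp

lemma pv_pow_and (s : Nat) : 2 ^ s &&& (2 ^ s - 1) = 0 := by
  apply Nat.eq_of_testBit_eq
  intro j
  rw [Nat.testBit_and, Nat.testBit_two_pow, Nat.testBit_two_pow_sub_one, Nat.zero_testBit]
  by_cases h : s = j <;> simp [h]

lemma pv_odd_decomp : ∀ (m : Nat), m ≠ 0 → ∃ r a, m = 2 ^ r * (2 * a + 1) := by
  intro m
  induction m using Nat.strong_induction_on with
  | _ m ih =>
    intro hm
    rcases Nat.even_or_odd m with he | ho
    · obtain ⟨r, a, hra⟩ := ih (m / 2) (by omega) (by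
        rcases he with ⟨t, ht⟩
        omega)
      refine ⟨r + 1, a, ?_⟩
      rcases he with ⟨t, ht⟩
      have hmt : m / 2 = t := by omega
      rw [hmt] at hra
      rw [show m = 2 * t by omega, hra, pow_succ]
      ring
    · rcases ho with ⟨t, ht⟩
      refine ⟨0, t, by rw [pow_zero]; omega⟩

lemma pv_tb_double (a k : Nat) : (2 * a).testBit (k + 1) = (2 * a + 1).testBit (k + 1) := by
  rw [Nat.testBit_succ, Nat.testBit_succ]
  congr 1
  omega

lemma pv_clear_lowest (r a : Nat) :
    ∀ j, ((2 ^ r * (2 * a + 1)) &&& (2 ^ r * (2 * a + 1) - 1)).testBit j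
      = ((2 ^ r * (2 * a + 1)).testBit j && decide (r < j)) := by
  intro j
  have h2r : (1 : Nat) ≤ 2 ^ r := Nat.one_le_two_pow
  have hm1 : 2 ^ r * (2 * a + 1) - 1 = 2 ^ r * (2 * a) + (2 ^ r - 1) := by
    have : 2 ^ r * (2 * a + 1) = 2 ^ r * (2 * a) + 2 ^ r := by ring
    omega
  rw [Nat.testBit_and, hm1, Nat.testBit_two_pow_mul_add _ (show 2 ^ r - 1 < 2 ^ r by omega) j,
    pv_decomp_tb]
  by_cases hj : j < r
  · simp [hj]
  · rcases (show j = r ∨ r < j by omega) with rfl | hlt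
    · simp only [if_neg hj, Nat.sub_self]
      rw [Nat.testBit_zero]
      simp
    · simp only [if_neg hj]
      obtain ⟨k, hk⟩ : ∃ k, j - r = k + 1 := ⟨j - r - 1, by omega⟩
      rw [hk, ← pv_tb_double]
      simp [show r < j from hlt]

lemma pv_two_bits (m : Nat) (hm : m ≠ 0) (h2 : m &&& (m - 1) ≠ 0)
    (h3 : (m &&& (m - 1)) &&& ((m &&& (m - 1)) - 1) = 0) :
    ∃ r s, r < s ∧ m = 2 ^ s + 2 ^ r ∧ m &&& (m - 1) = 2 ^ s := by
  obtain ⟨r, a, hra⟩ := pv_odd_decomp m hm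
  set x := m &&& (m - 1) with hx
  have hxb : ∀ j, x.testBit j = (m.testBit j && decide (r < j)) := by
    intro j; rw [hx, hra]; exact pv_clear_lowest r a j
  obtain ⟨s, b, hsb⟩ := pv_odd_decomp x h2
  have hxs : x.testBit s = true := by rw [hsb]; exact pv_decomp_tb_self s b
  have hxhigh : ∀ j, s < j → x.testBit j = false := by
    intro j hj
    have hz : (x &&& (x - 1)).testBit j = false := by rw [h3]; exact Nat.zero_testBit j
    rw [hsb, pv_clear_lowest s b j, ← hsb] at hz
    rcases Bool.eq_false_or_eq_true (x.testBit j) with hb | hb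
    · rw [hb] at hz; simp [show s < j from hj] at hz
    · exact hb
  have hxpow : x = 2 ^ s := by
    apply Nat.eq_of_testBit_eq
    intro j
    rw [Nat.testBit_two_pow]
    rcases (show j < s ∨ j = s ∨ s < j by omega) with hj | rfl | hj
    · rw [hsb, pv_decomp_tb, if_pos hj]
      simp
      omega
    · simp [hxs]
    · rw [hxhigh j hj]
      simp
      omega
  have hrs : r < s := by
    have h := hxb s
    rw [hxs] at h
    rcases Bool.eq_false_or_eq_true (decide (r < s)) with hb | hb
    · exact of_decide_eq_true hb
    · rw [hb] at h; simp at h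
  have hmr : m.testBit r = true := by rw [hra]; exact pv_decomp_tb_self r a
  have hmlow : ∀ j, j < r → m.testBit j = false := by
    intro j hj
    rw [hra, pv_decomp_tb, if_pos hj]
  refine ⟨r, s, hrs, ?_, hxpow⟩
  apply Nat.eq_of_testBit_eq
  intro j
  rw [pv_tb_sum r s j hrs]
  rcases (show j < r ∨ j = r ∨ r < j by omega) with hj | rfl | hj
  · rw [hmlow j hj]
    have h1 : ¬ (j = r) := by omega
    have h2 : ¬ (j = s) := by omega
    simp [h1, h2]
  · simp [hmr]
  · have h := hxb j
    rw [show decide (r < j) = true by simpa using hj, Bool.and_true] at h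
    rw [← h, hxpow, Nat.testBit_two_pow]
    have h1 : ¬ (j = r) := by omega
    simp [h1]
    constructor <;> omega

lemma pv_bitCount_pow : ∀ (k : Nat), PySem.Int.bitCount ((2 ^ k : Nat) : Int) = 1 := by
  intro k
  induction k with
  | zero => decide
  | succ k ih =>
    rw [PySem.Int.bitCount_natCast (by positivity)]
    rw [show (2 : Nat) ^ (k + 1) % 2 = 0 by rw [pow_succ]; omega,
      show (2 : Nat) ^ (k + 1) / 2 = 2 ^ k by rw [pow_succ]; omega]
    omega

lemma pv_bitCount_two : ∀ (r s : Nat), r < s → PySem.Int.bitCount ((2 ^ s + 2 ^ r : Nat) : Int) = 2 := by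
  intro r
  induction r with
  | zero =>
    intro s hs
    rw [PySem.Int.bitCount_natCast (by positivity)]
    have h2 : (2 : Nat) ^ s % 2 = 0 := by
      rcases (show ∃ t, s = t + 1 by exact ⟨s - 1, by omega⟩) with ⟨t, rfl⟩
      rw [pow_succ]; omega
    rw [show (2 ^ s + 2 ^ 0 : Nat) % 2 = 1 by rw [pow_zero]; omega]
    rcases (show ∃ t, s = t + 1 by exact ⟨s - 1, by omega⟩) with ⟨t, rfl⟩
    rw [show (2 ^ (t + 1) + 2 ^ 0 : Nat) / 2 = 2 ^ t by rw [pow_zero, pow_succ]; omega]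
    rw [pv_bitCount_pow]
  | succ r ih =>
    intro s hs
    rcases (show ∃ t, s = t + 1 by exact ⟨s - 1, by omega⟩) with ⟨t, rfl⟩
    rw [PySem.Int.bitCount_natCast (by positivity)]
    rw [show (2 ^ (t + 1) + 2 ^ (r + 1) : Nat) % 2 = 0 by rw [pow_succ, pow_succ]; omega,
      show (2 ^ (t + 1) + 2 ^ (r + 1) : Nat) / 2 = 2 ^ t + 2 ^ r by rw [pow_succ, pow_succ]; omega]
    rw [ih t (by omega)]

lemma pv_tb_neg_high (x : Int) (hx : x < 0) (k : Nat)
    (hk : PySem.Int.bitLength x ≤ k) : x.testBit k = true := by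
  have hlt := PySem.Int.lt_two_pow_bitLength x
  have hu : (-x - 1).toNat < 2 ^ k := by
    have : (2 : Nat) ^ PySem.Int.bitLength x ≤ 2 ^ k := Nat.pow_le_pow_right (by norm_num) hk
    omega
  rw [show x = Int.negSucc ((-x - 1).toNat) by rw [Int.negSucc_eq]; omega]
  show (!((-x - 1).toNat).testBit k) = true
  rw [Nat.testBit_lt_two_pow hu]
  rfl


lemma pv_core (G_pq S : Int) (n m : Nat) (hmlt : m < 2 ^ n)
    (hbit : ∀ k, k < n → m.testBit k = (PySem.Int.bxor S G_pq).testBit k) :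
    pvAhead G_pq S ((List.range n).filter (fun k => m.testBit k)) = pvTail S m := by
  set L := (List.range n).filter (fun k => m.testBit k) with hLdef
  by_cases hL : L.length = 2
  · obtain ⟨r, s, hLrs⟩ : ∃ r s, L = [r, s] := by
      rcases L with _ | ⟨r, _ | ⟨s, _ | ⟨t, u⟩⟩⟩ <;> simp at hL
      exact ⟨r, s, rfl⟩
    obtain ⟨hrs, hmval⟩ := pv_filter_two n m r s hmlt (hLdef ▸ hLrs)
    have hrn : r < n := by
      have : r ∈ L := by rw [hLrs]; simp
      rw [hLdef, List.mem_filter, List.mem_range] at this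
      exact this.1
    have hsn : s < n := by
      have : s ∈ L := by rw [hLrs]; simp
      rw [hLdef, List.mem_filter, List.mem_range] at this
      exact this.1
    have htbr : m.testBit r = true := by
      have : r ∈ L := by rw [hLrs]; simp
      rw [hLdef, List.mem_filter] at this
      exact this.2
    have htbs : m.testBit s = true := by
      have : s ∈ L := by rw [hLrs]; simp
      rw [hLdef, List.mem_filter] at this
      exact this.2
    have h2r : (1 : Nat) ≤ 2 ^ r := Nat.one_le_two_pow
    have h2s : (1 : Nat) ≤ 2 ^ s := Nat.one_le_two_pow
    have h2rs : (2 : Nat) ^ r < 2 ^ s := Nat.pow_lt_pow_right (by norm_num) hrs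
    have hm1 : (1 : Nat) ≤ m := by omega
    have hsub : ((m : Int) - 1) = (((m - 1 : Nat)) : Int) := by omega
    have hd2 : PySem.Int.band (m : Int) ((m : Int) - 1) = ((2 ^ s : Nat) : Int) := by
      rw [hsub, PySem.Int.band_natCast]
      congr 1
      rw [hmval]
      exact pv_and_sub_one r s hrs
    have hxr : PySem.Int.bxor (m : Int) (((2 ^ s : Nat)) : Int) = ((2 ^ r : Nat) : Int) := by
      rw [PySem.Int.bxor_natCast]
      congr 1
      rw [hmval]
      exact pv_xor_high r s hrs
    have hblr : PySem.Int.bitLength (((2 ^ r : Nat)) : Int) = r + 1 := by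
      apply pv_bitLength_eq
      · exact le_refl _
      · rw [pow_succ]; omega
    have hbls : PySem.Int.bitLength (((2 ^ s : Nat)) : Int) = s + 1 := by
      apply pv_bitLength_eq
      · exact le_refl _
      · rw [pow_succ]; omega
    have hsub2 : (((2 ^ s : Nat) : Int) - 1) = (((2 ^ s - 1 : Nat)) : Int) := by omega
    have hg2 : PySem.Int.band (((2 ^ s : Nat)) : Int) ((((2 ^ s : Nat)) : Int) - 1) = 0 := by
      rw [hsub2, PySem.Int.band_natCast, pv_pow_and]
      rfl
    unfold pvAhead pvTail
    rw [hLrs]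
    simp only [List.map_cons, List.map_nil, List.length_cons, List.length_nil]
    rw [if_pos trivial, if_neg (by omega : ¬ ((m : Nat) : Int) = 0), hd2, hxr, hblr, hbls]
    rw [show PySem.List.pyGetD [(r : Int), (s : Int)] 0 0 = (r : Int) from by
      rw [PySem.List.pyGetD_ofNat']; rfl]
    rw [show PySem.List.pyGetD [(r : Int), (s : Int)] 1 0 = (s : Int) from by
      rw [PySem.List.pyGetD_ofNat']; rfl]
    rw [show (((r + 1 : Nat)) : Int) - 1 = (r : Int) by omega,
      show (((s + 1 : Nat)) : Int) - 1 = (s : Int) by omega]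
    rw [if_neg (show ¬ ((((2 ^ s : Nat)) : Int) = 0 ∨
        PySem.Int.band (((2 ^ s : Nat)) : Int) ((((2 ^ s : Nat)) : Int) - 1) ≠ 0) from by
      push_neg
      exact ⟨by omega, hg2⟩)]
    -- A's redundant G_pq check is implied by the S check at a differing position
    have hneq : ∀ k : Nat, m.testBit k = true → k < n →
        (PySem.Int.band (S >>> ((k : Nat) : Int)) 1 ≠ 0 → PySem.Int.band (G_pq >>> ((k : Nat) : Int)) 1 = 0) := by
      intro k htb hkn hS
      have hdk : (PySem.Int.bxor S G_pq).testBit k = true := by rw [← hbit k hkn]; exact htb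
      rw [pv_itb_bxor] at hdk
      have hSk : S.testBit k = true := (pv_cond_iff' S k).1 hS
      have hGk : G_pq.testBit k = false := by
        rcases Bool.eq_false_or_eq_true (G_pq.testBit k) with hg | hg
        · rw [hSk, hg] at hdk; simp at hdk
        · exact hg
      by_contra hc
      exact absurd ((pv_cond_iff' G_pq k).1 hc) (by rw [hGk]; simp)
    by_cases hScond : PySem.Int.band (S >>> ((r : Nat) : Int)) 1 ≠ 0 ∧ PySem.Int.band (S >>> ((s : Nat) : Int)) 1 ≠ 0
    · rw [if_pos hScond, if_pos hScond,
        if_pos ⟨hneq r htbr hrn hScond.1, hneq s htbs hsn hScond.2⟩]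
    · rw [if_neg hScond, if_neg hScond]
  · unfold pvAhead pvTail
    rw [if_neg (by simpa using hL)]
    by_cases hm0 : ((m : Nat) : Int) = 0
    · rw [if_pos hm0]
    · rw [if_neg hm0]
      by_cases hg : PySem.Int.band (m : Int) ((m : Int) - 1) = 0 ∨
          PySem.Int.band (PySem.Int.band (m : Int) ((m : Int) - 1))
            (PySem.Int.band (m : Int) ((m : Int) - 1) - 1) ≠ 0
      · rw [if_pos hg]
      · exfalso
        push_neg at hg
        obtain ⟨hg1, hg2⟩ := hg
        have hm0' : m ≠ 0 := by omega
        have hsub : ((m : Int) - 1) = (((m - 1 : Nat)) : Int) := by omega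
        have hband : PySem.Int.band (m : Int) ((m : Int) - 1) = ((m &&& (m - 1) : Nat) : Int) := by
          rw [hsub, PySem.Int.band_natCast]
        rw [hband] at hg1 hg2
        set x := m &&& (m - 1) with hxdef
        have hx0 : x ≠ 0 := by
          intro hc
          rw [hc] at hg1
          exact hg1 rfl
        have hsub2 : (((x : Nat) : Int) - 1) = (((x - 1 : Nat)) : Int) := by omega
        rw [hsub2, PySem.Int.band_natCast] at hg2
        have hxx : x &&& (x - 1) = 0 := by exact_mod_cast hg2
        obtain ⟨r, s, hrs, hmval, _⟩ := pv_two_bits m hm0' hx0 hxx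
        have hlen : PySem.Int.bitCount ((m : Nat) : Int) = L.length := by
          rw [hLdef]; exact pv_bitCount_len n m hmlt
        have hlen2 : PySem.Int.bitCount ((m : Nat) : Int) = 2 := by
          rw [hmval, pv_bitCount_two r s hrs]
        exact hL (by omega)

lemma pv_main (G_pq S norb : Int) :
    get_creation_pair G_pq S norb = get_creation_pair_alt G_pq S norb := by
  rcases (show norb ≤ 0 ∨ 0 < norb by omega) with hn | hn
  · simp only [get_creation_pair, get_creation_pair_alt]
    rw [pv_pyRange_nil (by omega : (2 : Int) * norb ≤ 0)]
    simp [hn]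
  · simp only [get_creation_pair, get_creation_pair_alt]
    rw [if_neg (by omega : ¬ norb ≤ 0)]
    set diff := PySem.Int.bxor S G_pq with hdiff
    set n : Nat := (2 * norb).toNat with hnn
    have hcast : (2 * norb : Int) = (n : Int) := by omega
    have hP0 : (0 : Int) < 2 ^ n := by positivity
    have hd : PySem.Int.band diff ((1 : Int) <<< ((n : Nat) : Int) - 1) = diff % 2 ^ n := by
      rw [pv_one_shiftl, pv_band_mask]
    set m : Nat := (diff % 2 ^ n).toNat with hm
    have hd0 : 0 ≤ diff % 2 ^ n := Int.emod_nonneg _ (by omega)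
    have hdm : diff % 2 ^ n = (m : Int) := by omega
    have hPc : (((2 : Nat) ^ n : Nat) : Int) = (2 : Int) ^ n := by push_cast; ring
    have hmlt : m < 2 ^ n := by
      have := Int.emod_lt_of_pos diff hP0
      omega
    have hbit : ∀ k : Nat, k < n → m.testBit k = diff.testBit k := by
      intro k hk
      rw [← pv_itb_natCast, ← hdm, pv_itb_emod_pow _ _ _ hk]
    rw [hcast, PySem.List.pyRange_zero_natCast, pv_foldl_app_if, List.nil_append, List.filter_map]
    rw [show List.filter ((fun x : Int => decide (PySem.Int.band (diff >>> x) 1 ≠ 0))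
          ∘ (fun k : Nat => (k : Int))) (List.range n)
        = List.filter (fun k => m.testBit k) (List.range n) from by
      apply List.filter_congr
      intro k hk
      rw [List.mem_range] at hk
      simp only [Function.comp_apply]
      rw [Bool.eq_iff_iff, decide_eq_true_eq, pv_cond_iff', hbit k hk]]
    change pvAhead G_pq S ((List.range n).filter (fun k => m.testBit k)) = _
    by_cases hneg : diff < 0
    · by_cases hbig : ((n : Nat) : Int) > (PySem.Int.bitLength diff : Int) + 2
      · rw [if_pos ⟨hneg, hbig⟩]
        -- the sign extension puts at least three differing bits inside the window
        set B0 := PySem.Int.bitLength diff with hB0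
        have hmem3 : ∀ k, B0 ≤ k → k < n → k ∈ (List.range n).filter (fun k => m.testBit k) := by
          intro k h1 h2
          rw [List.mem_filter, List.mem_range]
          refine ⟨h2, ?_⟩
          rw [hbit k h2]
          exact pv_tb_neg_high diff hneg k h1
        have hsub3 : [B0, B0 + 1, B0 + 2] ⊆ (List.range n).filter (fun k => m.testBit k) := by
          intro k hk
          simp only [List.mem_cons, List.not_mem_nil, or_false] at hk
          rcases hk with rfl | rfl | rfl <;> exact hmem3 _ (by omega) (by omega)
        have hnd3 : ([B0, B0 + 1, B0 + 2] : List Nat).Nodup := by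
          simp
        have hlen3 : 3 ≤ ((List.range n).filter (fun k => m.testBit k)).length := by
          have := (List.subperm_of_subset hnd3 hsub3).length_le
          simpa using this
        unfold pvAhead
        rw [if_neg (by simp only [List.length_map]; omega)]
      · rw [if_neg (fun hc => hbig hc.2), if_pos hneg, hd, hdm]
        exact pv_core G_pq S n m hmlt (fun k hk => hbit k hk)
    · rw [if_neg (fun hc => hneg hc.1), if_neg hneg]
      by_cases hbl : (PySem.Int.bitLength diff : Int) > ((n : Nat) : Int)
      · rw [if_pos hbl, hd, hdm]
        exact pv_core G_pq S n m hmlt (fun k hk => hbit k hk)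
      · have hdiffm : diff = (m : Int) := by
          have h1 := PySem.Int.lt_two_pow_bitLength diff
          have h2 : (2 : Nat) ^ PySem.Int.bitLength diff ≤ 2 ^ n :=
            Nat.pow_le_pow_right (by norm_num) (by omega)
          have h3 : diff % 2 ^ n = diff := Int.emod_eq_of_lt (by omega) (by omega)
          omega
        rw [if_neg hbl, hdiffm]
        exact pv_core G_pq S n m hmlt (fun k hk => hbit k hk)

-- ===== VERDICT (by name: the statement is the Claim_ definition above) =====
theorem get_creation_pair_spec : Claim_equal_get_creation_pair := by
  intro G S norb _
  show _ = _
  exact pv_main G S norb
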